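-- pv_equiv track=rewrite | github.com/dmitry957/codewars-training | kata/7-kyu/double-trouble/solution.py | trouble
-- ===== SOURCE A (Python) =====
-- def trouble(x, t):
--     result = []
--     i = 0
--     while i < len(x):
--         if i + 1 < len(x) and x[i] + x[i + 1] == t:
--             result.append(x[i])
--             i += 2
--         else:
--             result.append(x[i])
--             i += 1
--     if result != x:
--         return trouble(result, t)
--     return result
-- ===== SOURCE B (Python) =====
-- def trouble(x, t):
--     # iterative fixpoint loop; each pass consumes a reversed stack (pop = current head)
--     while True:
--         out = []
--         stack = x[::-1]
--         while stack:
--             a = stack.pop()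
--             if stack and a + stack[-1] == t:
--                 stack.pop()
--             out.append(a)
--         if out == x:
--             return out
--         x = out
-- ===== Notes on version B (the rewrite author's own statement) =====
-- stated objective: alternative
-- what changed: Replaces A's tail recursion with an explicit iterative fixpoint loop, and replaces the index-based collapse pass with a pass that consumes the list as a stack (pop head, conditionally pop its partner).
import Mathlib
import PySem

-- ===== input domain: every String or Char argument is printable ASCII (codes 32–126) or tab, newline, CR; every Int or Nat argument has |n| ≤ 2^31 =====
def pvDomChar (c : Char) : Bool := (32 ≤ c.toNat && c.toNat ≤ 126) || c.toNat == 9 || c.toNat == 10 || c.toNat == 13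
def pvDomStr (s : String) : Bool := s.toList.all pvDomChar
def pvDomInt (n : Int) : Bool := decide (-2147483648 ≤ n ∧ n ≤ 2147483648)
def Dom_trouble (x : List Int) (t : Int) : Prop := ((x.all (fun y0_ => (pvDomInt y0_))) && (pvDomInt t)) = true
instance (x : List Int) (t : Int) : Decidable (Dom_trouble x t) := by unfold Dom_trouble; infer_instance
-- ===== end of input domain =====

-- B replaces A's tail recursion with an explicit iterative fixpoint loop and a head/rest
-- collapse pass (alternative decomposition, no speed claim); return values agree on all inputs.


-- ===== PORT A =====
-- A's inner while loop over index i, appending to result (accumulator); fuel only makes the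
-- loop total — it is proved sufficient below, so the value never depends on it
def troublePassA (x : List Int) (t : Int) : Nat → List Int → Nat → List Int
  | 0, result, _ => result
  | fuel + 1, result, i =>
      if i < x.length then
        if i + 1 < x.length ∧ x.getD i 0 + x.getD (i + 1) 0 = t then
          troublePassA x t fuel (result ++ [x.getD i 0]) (i + 2)
        else
          troublePassA x t fuel (result ++ [x.getD i 0]) (i + 1)
      else result

-- A's outer tail recursion ('if result != x: return trouble(result, t)'), fuel-guarded likewise
def troubleLoopA (t : Int) : Nat → List Int → List Int
  | 0, x => x
  | fuel + 1, x =>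
      let result := troublePassA x t (x.length + 1) [] 0
      if result ≠ x then troubleLoopA t fuel result else result

def trouble (x : List Int) (t : Int) : List Int := troubleLoopA t (x.length + 1) x

-- ===== PORT B =====
-- B's inner while loop: the stack is held top-first, so Python's pop-from-end is the head here
def troublePassB (t : Int) (out : List Int) : List Int → List Int
  | [] => out
  | [a] => troublePassB t (out ++ [a]) []
  | a :: b :: r =>
      if a + b = t then troublePassB t (out ++ [a]) r
      else troublePassB t (out ++ [a]) (b :: r)
termination_by l => l.length

-- B's outer 'while True' fixpoint loop, fuel-guarded (fuel proved sufficient below)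
def troubleLoopB (t : Int) : Nat → List Int → List Int
  | 0, x => x
  | fuel + 1, x =>
      let out := troublePassB t [] x
      if out = x then out else troubleLoopB t fuel out

def trouble_alt (x : List Int) (t : Int) : List Int := troubleLoopB t (x.length + 1) x

-- ===== PRECONDITION & SPEC =====
def Spec_trouble (x : List Int) (t : Int) (out : List Int) : Prop := out = trouble_alt x t
instance (x : List Int) (t : Int) (out : List Int) : Decidable (Spec_trouble x t out) := by unfold Spec_trouble; infer_instance

-- ===== CLAIM (what is proved, stated in full; the proofs are below) =====
def Claim_equal_trouble : Prop := ∀ (x : List Int) (t : Int), Dom_trouble x t → Spec_trouble x t (trouble x t)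

-- ===== LEMMAS AND PROOFS =====
-- reference one-pass collapse, used only in the proofs
def troubleStep (t : Int) : List Int → List Int
  | [] => []
  | [a] => [a]
  | a :: b :: r => if a + b = t then a :: troubleStep t r else a :: troubleStep t (b :: r)
termination_by l => l.length

theorem troubleStep_len (t : Int) (l : List Int) : (troubleStep t l).length ≤ l.length := by
  fun_induction troubleStep t l with
  | case1 => simp
  | case2 => simp
  | case3 a b r h ih => simp only [List.length_cons]; omega
  | case4 a b r h ih => simp only [List.length_cons] at ih ⊢; omega

theorem troubleStep_fix (t : Int) (l : List Int) :
    troubleStep t l = l ∨ (troubleStep t l).length < l.length := by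
  fun_induction troubleStep t l with
  | case1 => left; rfl
  | case2 => left; rfl
  | case3 a b r h ih =>
      right
      have := troubleStep_len t r
      simp only [List.length_cons]; omega
  | case4 a b r h ih =>
      rcases ih with h1 | h1
      · left; rw [h1]
      · right; simp only [List.length_cons] at h1 ⊢; omega

theorem troublePassA_drop (x : List Int) (t : Int) :
    ∀ (fuel : Nat) (result : List Int) (i : Nat), x.length - i < fuel →
      troublePassA x t fuel result i = result ++ troubleStep t (x.drop i) := by
  intro fuel
  induction fuel with
  | zero => intro result i hf; omega
  | succ n ih =>
    intro result i hf
    rw [troublePassA]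
    by_cases h : i < x.length
    · simp only [if_pos h]
      by_cases h2 : i + 1 < x.length
      · by_cases hs : x[i] + x[i + 1] = t
        · rw [if_pos ⟨h2, by rw [List.getD_eq_getElem x 0 h, List.getD_eq_getElem x 0 h2]; exact hs⟩]
          rw [ih _ _ (by omega), List.drop_eq_getElem_cons h, List.drop_eq_getElem_cons h2,
            troubleStep, if_pos hs, List.getD_eq_getElem x 0 h]
          simp
        · rw [if_neg (fun hc => hs (by
            have hx := hc.2
            rwa [List.getD_eq_getElem x 0 h, List.getD_eq_getElem x 0 h2] at hx))]
          rw [ih _ _ (by omega), List.drop_eq_getElem_cons h, List.drop_eq_getElem_cons h2,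
            troubleStep, if_neg hs, ← List.drop_eq_getElem_cons h2, List.getD_eq_getElem x 0 h]
          simp
      · rw [if_neg (fun hc => h2 hc.1)]
        have hd2 : x.drop (i + 1) = [] := List.drop_eq_nil_of_le (by omega)
        rw [ih _ _ (by omega), List.drop_eq_getElem_cons h, hd2, List.getD_eq_getElem x 0 h]
        simp [troubleStep]
    · have hd : x.drop i = [] := List.drop_eq_nil_of_le (by omega)
      simp [h, hd, troubleStep]

theorem troublePassB_eq (t : Int) :
    ∀ (rest out : List Int), troublePassB t out rest = out ++ troubleStep t rest := by
  intro rest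
  induction rest using troubleStep.induct t with
  | case1 => intro out; simp [troublePassB, troubleStep]
  | case2 a => intro out; simp [troublePassB, troubleStep]
  | case3 a b r h ih => intro out; simp [troublePassB, troubleStep, h, ih]
  | case4 a b r h ih => intro out; simp [troublePassB, troubleStep, h, ih]

theorem troubleLoop_eq (t : Int) :
    ∀ (fuel : Nat) (x : List Int), x.length < fuel →
      troubleLoopA t fuel x = troubleLoopB t fuel x := by
  intro fuel
  induction fuel with
  | zero => intro x hx; omega
  | succ n ih =>
    intro x hx
    rw [troubleLoopA, troubleLoopB]
    have hA : troublePassA x t (x.length + 1) [] 0 = troubleStep t x := by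
      simpa using troublePassA_drop x t (x.length + 1) [] 0 (by omega)
    have hB : troublePassB t [] x = troubleStep t x := by
      simpa using troublePassB_eq t x []
    simp only [hA, hB]
    by_cases h : troubleStep t x = x
    · simp [h]
    · rcases troubleStep_fix t x with h1 | h1
      · exact absurd h1 h
      · simp only [ne_eq, h, not_false_iff, if_pos]
        exact ih _ (by omega)

theorem trouble_eq_alt (x : List Int) (t : Int) : trouble x t = trouble_alt x t := by
  unfold trouble trouble_alt
  exact troubleLoop_eq t (x.length + 1) x (by omega)

-- ===== VERDICT (by name: the statement is the Claim_ definition above) =====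
theorem trouble_spec : Claim_equal_trouble := by
  intro x t _
  unfold Spec_trouble
  exact trouble_eq_alt x t
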